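-- pv_equiv track=rewrite | github.com/OmGhag/CSCI-544-Assignment | HW3/submissions/utils.py | build_vocab
-- ===== SOURCE A (Python) =====
-- def build_vocab(sentences):
--     word2idx = {"<PAD>": 0, "<UNK>": 1}
--     tag2idx = {"<PAD>": 0}
--
--     for sentence in sentences:
--         for word, tag in sentence:
--             if word not in word2idx:
--                 word2idx[word] = len(word2idx)
--             if tag not in tag2idx:
--                 tag2idx[tag] = len(tag2idx)
--
--     return word2idx, tag2idx
-- ===== SOURCE B (Python) =====
-- def build_vocab(sentences):
--     pairs = [p for s in sentences for p in s]
--     uniq_words = dict.fromkeys(w for w, _ in pairs)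
--     uniq_tags = dict.fromkeys(t for _, t in pairs)
--     word2idx = {"<PAD>": 0, "<UNK>": 1}
--     word2idx.update(
--         (w, i)
--         for i, w in enumerate((w for w in uniq_words if w not in ("<PAD>", "<UNK>")), start=2)
--     )
--     tag2idx = {"<PAD>": 0}
--     tag2idx.update((t, i) for i, t in enumerate((t for t in uniq_tags if t != "<PAD>"), start=1))
--     return word2idx, tag2idx
-- ===== Notes on version B (the rewrite author's own statement) =====
-- stated objective: alternative
-- what changed: B never consults the dict being built: it flattens once, dedups words/tags with dict.fromkeys, filters out the seed tokens, and assigns indices positionally via enumerate with a start offset, feeding one bulk update into the seed dicts, instead of A's interleaved membership test against the growing dict and len()-based counter.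
import Mathlib
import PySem

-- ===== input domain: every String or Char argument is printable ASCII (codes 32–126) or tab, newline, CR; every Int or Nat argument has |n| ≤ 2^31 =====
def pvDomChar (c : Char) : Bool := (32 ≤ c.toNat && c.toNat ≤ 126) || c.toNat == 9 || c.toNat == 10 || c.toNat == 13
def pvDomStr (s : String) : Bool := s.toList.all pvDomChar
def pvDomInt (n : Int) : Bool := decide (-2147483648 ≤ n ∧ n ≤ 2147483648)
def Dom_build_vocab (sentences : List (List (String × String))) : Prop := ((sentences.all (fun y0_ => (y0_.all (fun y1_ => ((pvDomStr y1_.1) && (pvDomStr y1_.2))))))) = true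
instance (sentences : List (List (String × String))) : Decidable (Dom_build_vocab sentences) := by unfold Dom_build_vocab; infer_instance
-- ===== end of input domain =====

-- B assigns indices positionally (enumerate with a start offset over the filtered deduped stream)
-- instead of A's membership test against the growing dict with a len()-based counter; same return value.

-- A's 'if x not in d: d[x] = len(d)'
def pvStep (d : PySem.Dict String Int) (x : String) : PySem.Dict String Int :=
  if d.contains x then d else d.insert x (d.size : Int)

def pvW0 : PySem.Dict String Int := (PySem.Dict.empty.insert "<PAD>" 0).insert "<UNK>" 1
def pvT0 : PySem.Dict String Int := PySem.Dict.empty.insert "<PAD>" 0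

-- ===== PORT A =====
def build_vocab (sentences : List (List (String × String))) : (List (String × Int)) × (List (String × Int)) :=
  let st := sentences.foldl
    (fun (st : PySem.Dict String Int × PySem.Dict String Int) sentence =>
      sentence.foldl (fun st p => (pvStep st.1 p.1, pvStep st.2 p.2)) st)
    (pvW0, pvT0)
  (st.1.items, st.2.items)

-- ===== PORT B =====
def build_vocab_alt (sentences : List (List (String × String))) : (List (String × Int)) × (List (String × Int)) :=
  let pairs := sentences.flatMap (fun s => s)
  let uniqWords := PySem.List.dedup (pairs.map Prod.fst)
  let uniqTags := PySem.List.dedup (pairs.map Prod.snd)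
  let newWords := uniqWords.filter (fun w => !(w == "<PAD>" || w == "<UNK>"))
  let word2idx := (PySem.List.enumerate newWords 2).foldl
    (fun (d : PySem.Dict String Int) p => d.insert p.2 p.1) pvW0
  let newTags := uniqTags.filter (fun t => !(t == "<PAD>"))
  let tag2idx := (PySem.List.enumerate newTags 1).foldl
    (fun (d : PySem.Dict String Int) p => d.insert p.2 p.1) pvT0
  (word2idx.items, tag2idx.items)

-- ===== PRECONDITION & SPEC =====
def Spec_build_vocab (sentences : List (List (String × String))) (out : (List (String × Int)) × (List (String × Int))) : Prop := out = build_vocab_alt sentences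
instance (sentences : List (List (String × String))) (out : (List (String × Int)) × (List (String × Int))) : Decidable (Spec_build_vocab sentences out) := by unfold Spec_build_vocab; infer_instance

-- ===== CLAIM (what is proved, stated in full; the proofs are below) =====
def Claim_equal_build_vocab : Prop := ∀ (sentences : List (List (String × String))), Dom_build_vocab sentences → Spec_build_vocab sentences (build_vocab sentences)

-- ===== LEMMAS AND PROOFS =====

lemma pvStep_contains (d : PySem.Dict String Int) (x y : String) (h : d.contains y = true) :
    (pvStep d x).contains y = true := by
  unfold pvStep
  split
  · exact h
  · simp [PySem.Dict.contains_insert, h]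

lemma pvStep_contains_self (d : PySem.Dict String Int) (x : String) :
    (pvStep d x).contains x = true := by
  unfold pvStep
  split
  · assumption
  · exact PySem.Dict.contains_insert_self _ _ _

lemma pvStep_of_contains (d : PySem.Dict String Int) (x : String) (h : d.contains x = true) :
    pvStep d x = d := by
  simp [pvStep, h]

-- folding pvStep ignores elements discarded because the dict already contains them
lemma foldl_pvStep_discard (s : List String) (x : String) :
    ∀ d : PySem.Dict String Int, d.contains x = true →
    List.foldl pvStep d (PySem.Set.discard s x) = List.foldl pvStep d s := by
  induction s with
  | nil => intro d _; rfl
  | cons y s ih =>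
    intro d hd
    by_cases hyx : y = x
    · subst hyx
      have : PySem.Set.discard (y :: s) y = PySem.Set.discard s y := by
        simp [PySem.Set.discard]
      rw [this, ih d hd, List.foldl_cons, pvStep_of_contains d y hd]
    · have : PySem.Set.discard (y :: s) x = y :: PySem.Set.discard s x := by
        simp [PySem.Set.discard, hyx]
      rw [this, List.foldl_cons, List.foldl_cons]
      exact ih (pvStep d y) (pvStep_contains d y x hd)

-- folding pvStep over the deduped list equals folding it over the raw list
lemma foldl_pvStep_dedup (xs : List String) :
    ∀ d : PySem.Dict String Int,
    List.foldl pvStep d (PySem.List.dedup xs) = List.foldl pvStep d xs := by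
  induction xs with
  | nil => intro d; rfl
  | cons x xs ih =>
    intro d
    have h : PySem.List.dedup (x :: xs) = x :: PySem.Set.discard (PySem.List.dedup xs) x := by
      simpa [PySem.List.dedup] using PySem.Set.ofList_cons (x := x) (xs := xs)
    rw [h, List.foldl_cons, List.foldl_cons,
        foldl_pvStep_discard _ _ _ (pvStep_contains_self d x), ih]

-- KEY LEMMA: over a duplicate-free list, A's interleaved membership-and-increment loop
-- equals B's shape: filter out the keys already present, enumerate from the current size,
-- and bulk-insert.
lemma foldl_pvStep_eq_enumerate (xs : List String) :
    ∀ d : PySem.Dict String Int, xs.Nodup →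
    List.foldl pvStep d xs
    = (PySem.List.enumerate (xs.filter (fun x => !d.contains x)) (d.size : Int)).foldl
        (fun (d : PySem.Dict String Int) p => d.insert p.2 p.1) d := by
  induction xs with
  | nil => intro d _; rfl
  | cons x xs ih =>
    intro d hnd
    have hx : x ∉ xs := (List.nodup_cons.mp hnd).1
    have hxs : xs.Nodup := (List.nodup_cons.mp hnd).2
    by_cases hc : d.contains x = true
    · have hf : (x :: xs).filter (fun x => !d.contains x)
          = xs.filter (fun x => !d.contains x) := by
        simp [hc]
      rw [hf, List.foldl_cons, pvStep_of_contains d x hc, ih d hxs]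
    · have hc' : d.contains x = false := by simpa using hc
      have hf : (x :: xs).filter (fun x => !d.contains x)
          = x :: xs.filter (fun x => !d.contains x) := by
        simp [hc']
      have hstep : pvStep d x = d.insert x (d.size : Int) := by
        simp [pvStep, hc']
      have hsz : (d.insert x (d.size : Int)).size = d.size + 1 := by
        simp [PySem.Dict.size_insert, hc']
      have hfilter : xs.filter (fun y => !(d.insert x (d.size : Int)).contains y)
          = xs.filter (fun y => !d.contains y) := by
        apply List.filter_congr
        intro y hy
        have hyx : (y == x) = false := by
          simp only [beq_eq_false_iff_ne, ne_eq]
          intro h; exact hx (h ▸ hy)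
        simp [PySem.Dict.contains_insert, hyx]
      rw [hf, PySem.List.enumerate_cons, List.foldl_cons, List.foldl_cons, hstep,
          ih _ hxs, hfilter, hsz]
      push_cast
      ring_nf

-- ===== VERDICT (by name: the statement is the Claim_ definition above) =====
theorem build_vocab_spec : Claim_equal_build_vocab := by
  intro sentences _
  simp only [Spec_build_vocab, build_vocab, build_vocab_alt]
  have hin : ∀ (st : PySem.Dict String Int × PySem.Dict String Int)
      (sentence : List (String × String)),
      sentence.foldl (fun st p => (pvStep st.1 p.1, pvStep st.2 p.2)) st
      = (sentence.foldl (fun d p => pvStep d p.1) st.1,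
         sentence.foldl (fun d p => pvStep d p.2) st.2) := by
    intro st sentence
    cases st
    exact PySem.List.foldl_prod_mk (fun d (p : String × String) => pvStep d p.1)
      (fun d (p : String × String) => pvStep d p.2) sentence _ _
  have hA : sentences.foldl
      (fun (st : PySem.Dict String Int × PySem.Dict String Int) sentence =>
        sentence.foldl (fun st p => (pvStep st.1 p.1, pvStep st.2 p.2)) st)
      (pvW0, pvT0)
      = (sentences.foldl (fun d sentence => sentence.foldl (fun d p => pvStep d p.1) d) pvW0,
         sentences.foldl (fun d sentence => sentence.foldl (fun d p => pvStep d p.2) d) pvT0) := by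
    simp only [hin]
    exact PySem.List.foldl_prod_mk _ _ _ _ _
  rw [hA]
  have hflat : ∀ (f : String × String → String) (d : PySem.Dict String Int),
      sentences.foldl (fun d sentence => sentence.foldl (fun d p => pvStep d (f p)) d) d
      = List.foldl pvStep d ((sentences.flatMap (fun s => s)).map f) := by
    intro f d
    simp only [List.flatMap_def, List.map_id_fun', id_eq, List.foldl_map,
      List.foldl_flatten]
  rw [hflat Prod.fst, hflat Prod.snd,
      ← foldl_pvStep_dedup (((sentences.flatMap (fun s => s)).map Prod.fst)) pvW0,
      ← foldl_pvStep_dedup (((sentences.flatMap (fun s => s)).map Prod.snd)) pvT0,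
      foldl_pvStep_eq_enumerate _ pvW0 (PySem.List.nodup_dedup _),
      foldl_pvStep_eq_enumerate _ pvT0 (PySem.List.nodup_dedup _)]
  have hw : ∀ xs : List String,
      xs.filter (fun x => !pvW0.contains x) = xs.filter (fun w => !(w == "<PAD>" || w == "<UNK>")) := by
    intro xs
    apply List.filter_congr
    intro y _
    simp [pvW0, PySem.Dict.contains_insert, PySem.Dict.contains_empty, Bool.or_comm]
  have ht : ∀ xs : List String,
      xs.filter (fun x => !pvT0.contains x) = xs.filter (fun t => !(t == "<PAD>")) := by
    intro xs
    apply List.filter_congr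
    intro y _
    simp [pvT0, PySem.Dict.contains_insert, PySem.Dict.contains_empty]
  rw [hw, ht]
  rfl
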